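-- pv_equiv track=rewrite | github.com/matheushomrich/coderDecoder | t1.py | codMan
-- ===== SOURCE A (Python) =====
-- def hexToBin(input):
--     return bin(int(input, base = 16))[2:].zfill(16)
--
-- def codMan(input):
--
--     binInput = str(hexToBin(input))
--
--     currentSignal = "-"
--
--     nextSignals = ""
--     codedSignal = ""
--
--     for i in range(0, len(binInput)):
--         if binInput[i] == '0':
--             if currentSignal == '-':
--                 nextSignals = '+-'
--                 currentSignal = '-'
--             else:
--                 nextSignals = '-+'
--                 currentSignal = '+'
--         elif currentSignal == '-':
--             nextSignals = '-+'
--             currentSignal = '+'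
--         else:
--             nextSignals = '+-'
--             currentSignal = '-'
--         codedSignal += nextSignals
--
--     return codedSignal
-- ===== SOURCE B (Python) =====
-- def hexToBin(input):
--     return bin(int(input, base = 16))[2:].zfill(16)
--
-- def codMan(input):
--     # Divide-and-conquer: a segment's encoding under starting parity 1 is the
--     # sign-flipped image of its encoding under parity 0, so halves compose by
--     # flipping the right half when the left half carries odd parity.
--     def flip(s):
--         return s.translate(str.maketrans('+-', '-+'))
--
--     def enc(bits):
--         # returns (encoding assuming even starting parity, parity of bits)
--         if not bits:
--             return ('', 0)
--         if len(bits) == 1: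
--             b = bits != '0'
--             return ('-+' if b else '+-', int(b))
--         mid = len(bits) // 2
--         oL, pL = enc(bits[:mid])
--         oR, pR = enc(bits[mid:])
--         return (oL + (flip(oR) if pL else oR), pL ^ pR)
--
--     return enc(hexToBin(input))[0]
-- ===== Notes on version B (the rewrite author's own statement) =====
-- stated objective: alternative
-- what changed: Replaces A's left-to-right signal state machine with a divide-and-conquer encoder: the bit string is split in half, each half is encoded independently under even starting parity, and the right half's encoding is sign-flipped (swap '+'/'-') when the left half carries odd parity; correctness rests on the identity that encoding under odd starting parity is the charwise sign-flip of encoding under even parity.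
import Mathlib
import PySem

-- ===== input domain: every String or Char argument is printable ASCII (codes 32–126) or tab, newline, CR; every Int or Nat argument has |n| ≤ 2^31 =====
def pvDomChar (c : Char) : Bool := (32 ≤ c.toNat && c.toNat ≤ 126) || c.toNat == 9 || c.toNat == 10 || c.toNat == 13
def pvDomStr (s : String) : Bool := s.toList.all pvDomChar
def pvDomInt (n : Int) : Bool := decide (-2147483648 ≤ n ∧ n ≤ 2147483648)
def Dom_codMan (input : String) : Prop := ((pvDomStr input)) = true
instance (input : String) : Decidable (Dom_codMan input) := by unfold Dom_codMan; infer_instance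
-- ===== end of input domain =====

-- B replaces A's left-to-right signal state machine by a divide-and-conquer encoder
-- (encode halves under even parity, sign-flip the right half when the left half's
-- parity is odd); helper hexToBin is shared verbatim by both Pythons and ported once.

-- ===== PORT A =====
-- hexToBin: bin(int(input, base=16))[2:].zfill(16); int(_, 16) raises ValueError on bad
-- input (excluded by Pre_codMan), hence the Option result.
def hexToBin (input : String) : Option String :=
  match PySem.Int.ofStrBase? input 16 with
  | none => none
  | some n => some (String.ofList (PySem.Chars.zfill ((PySem.Int.toBinChars0b n).drop 2) 16))

-- A's loop body: state (currentSignal, nextSignals, codedSignal), the four branches in order.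
def codManStepA (st : String × String × String) (c : Char) : String × String × String :=
  let cur := st.1
  let coded := st.2.2
  if c = '0' then
    if cur = "-" then ("-", "+-", coded ++ "+-")
    else ("+", "-+", coded ++ "-+")
  else
    if cur = "-" then ("+", "-+", coded ++ "-+")
    else ("-", "+-", coded ++ "+-")

-- literal port of A: for i in range(0, len(binInput)) with binInput[i] (always in range).
def codMan (input : String) : String :=
  match hexToBin input with
  | none => ""  -- unreachable under Pre_codMan (Python raises ValueError)
  | some binInput =>
    let cs := binInput.toList
    ((PySem.List.pyRange 0 (PySem.List.len cs) 1).foldl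
      (fun st i => codManStepA st (PySem.List.pyGetD cs i ' ')) ("-", "", "")).2.2

-- ===== PORT B =====
-- flip: s.translate(str.maketrans('+-', '-+')) — maps '+'↦'-', '-'↦'+', leaves other
-- chars unchanged; exact for this two-character table.
def flipChar (c : Char) : Char := if c = '+' then '-' else if c = '-' then '+' else c

def flipStr (s : String) : String := String.ofList (s.toList.map flipChar)

-- Source B's enc on the character list: (encoding under even starting parity, parity of bits).
def encB (bits : List Char) : String × Bool :=
  match _h : bits with
  | [] => ("", false)
  | [b] => ((if b != '0' then "-+" else "+-"), b != '0')
  | _ :: _ :: _ =>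
    let mid := bits.length / 2
    let L := encB (bits.take mid)
    let R := encB (bits.drop mid)
    (L.1 ++ (if L.2 then flipStr R.1 else R.1), L.2 ^^ R.2)
termination_by bits.length
decreasing_by
  · simp_all; omega
  · simp_all; omega

-- literal port of Source B: return enc(hexToBin(input))[0].
def codMan_alt (input : String) : String :=
  match hexToBin input with
  | none => ""  -- unreachable under Pre_codMan (Python raises ValueError)
  | some binInput => (encB binInput.toList).1

-- ===== PRECONDITION & SPEC =====
-- Pre_ excludes exactly the inputs on which int(input, 16) raises ValueError (both A and B raise there).
def Pre_codMan (input : String) : Prop := (PySem.Int.ofStrBase? input 16).isSome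
instance (input : String) : Decidable (Pre_codMan input) := by unfold Pre_codMan; infer_instance
def pvWitness_codMan : String := "1f"
def Spec_codMan (input : String) (out : String) : Prop := out = codMan_alt input
instance (input : String) (out : String) : Decidable (Spec_codMan input out) := by unfold Spec_codMan; infer_instance

-- ===== CLAIM (what is proved, stated in full; the proofs are below) =====
def Claim_equal_codMan : Prop := ∀ (input : String), Dom_codMan input → Pre_codMan input → Spec_codMan input (codMan input)

-- ===== LEMMAS AND PROOFS =====

-- reference single-pass encoding at the character-list level: outPL bits p is the
-- Manchester output for bits when the running parity before bits is p.
def outPL (bits : List Char) (p : Bool) : List Char :=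
  match bits with
  | [] => []
  | c :: cs =>
    let p' := p ^^ (c != '0')
    (if p' then ['-', '+'] else ['+', '-']) ++ outPL cs p'

def parL (bits : List Char) : Bool :=
  match bits with
  | [] => false
  | c :: cs => (c != '0') ^^ parL cs

theorem outPL_flip (bits : List Char) (p : Bool) :
    outPL bits (!p) = (outPL bits p).map flipChar := by
  induction bits generalizing p with
  | nil => rfl
  | cons c cs ih =>
    simp only [outPL]
    have hx : ((!p) ^^ (c != '0')) = !(p ^^ (c != '0')) := by
      cases p <;> cases (c != '0') <;> rfl
    rw [hx, ih]
    cases hp : p ^^ (c != '0') <;> simp [flipChar]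

theorem parL_append (l1 l2 : List Char) : parL (l1 ++ l2) = (parL l1 ^^ parL l2) := by
  induction l1 with
  | nil => simp [parL]
  | cons a l ih =>
    simp only [List.cons_append, parL, ih, Bool.xor_assoc]

theorem outPL_append (l1 l2 : List Char) (p : Bool) :
    outPL (l1 ++ l2) p = outPL l1 p ++ outPL l2 (p ^^ parL l1) := by
  induction l1 generalizing p with
  | nil => simp [outPL, parL]
  | cons c cs ih =>
    simp only [List.cons_append, outPL, parL, ih]
    have hx : (p ^^ ((c != '0') ^^ parL cs)) = ((p ^^ (c != '0')) ^^ parL cs) := by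
      cases p <;> cases (c != '0') <;> cases parL cs <;> rfl
    rw [hx]
    simp

theorem encB_spec (bits : List Char) :
    encB bits = (String.ofList (outPL bits false), parL bits) := by
  induction hn : bits.length using Nat.strong_induction_on generalizing bits with
  | _ n ih =>
  match bits with
  | [] => rw [encB]; rfl
  | [b] =>
    rw [encB]
    simp only [outPL, parL]
    cases hb : b != '0' <;> simp [hb]
  | x :: y :: t =>
    rw [encB]
    have h1 : ((x :: y :: t).take ((x :: y :: t).length / 2)).length < n := by
      subst hn; simp; omega
    have h2 : ((x :: y :: t).drop ((x :: y :: t).length / 2)).length < n := by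
      subst hn; simp; omega
    have hL := ih _ h1 _ rfl
    have hR := ih _ h2 _ rfl
    rw [hL, hR]
    have hsplit : x :: y :: t
        = (x :: y :: t).take ((x :: y :: t).length / 2)
          ++ (x :: y :: t).drop ((x :: y :: t).length / 2) := (List.take_append_drop _ _).symm
    rw [Prod.mk.injEq]
    constructor
    · conv_rhs => rw [hsplit, outPL_append]
      simp only [Bool.false_xor]
      cases hp : parL ((x :: y :: t).take ((x :: y :: t).length / 2)) <;>
        simp [flipStr, ← outPL_flip, String.ofList_append]
    · conv_rhs => rw [hsplit, parL_append]

-- A's loop appends outPL to the accumulated coded signal; cur = "-" ↔ parity false.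
theorem codMan_loop (cs : List Char) (cur next coded : String) (p : Bool)
    (h : (cur = "-" ∧ p = false) ∨ (cur = "+" ∧ p = true)) :
    ((cs.foldl codManStepA (cur, next, coded)).2.2).toList
      = coded.toList ++ outPL cs p := by
  induction cs generalizing cur next coded p with
  | nil => simp [outPL]
  | cons c t ih =>
    simp only [List.foldl_cons, outPL]
    rcases h with ⟨hc, hp⟩ | ⟨hc, hp⟩ <;> subst hc <;> subst hp <;>
      by_cases h0 : c = '0'
    · subst h0
      rw [show codManStepA ("-", next, coded) '0' = ("-", "+-", coded ++ "+-") from rfl,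
        ih _ _ _ false (Or.inl ⟨rfl, rfl⟩)]
      simp
    · rw [show codManStepA ("-", next, coded) c = ("+", "-+", coded ++ "-+") from by
          simp [codManStepA, h0],
        ih _ _ _ true (Or.inr ⟨rfl, rfl⟩)]
      have hb : (c != '0') = true := by simp [h0]
      simp [hb]
    · subst h0
      rw [show codManStepA ("+", next, coded) '0' = ("+", "-+", coded ++ "-+") from by
          simp [codManStepA],
        ih _ _ _ true (Or.inr ⟨rfl, rfl⟩)]
      simp
    · rw [show codManStepA ("+", next, coded) c = ("-", "+-", coded ++ "+-") from by
          simp [codManStepA, h0],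
        ih _ _ _ false (Or.inl ⟨rfl, rfl⟩)]
      have hb : (c != '0') = true := by simp [h0]
      simp [hb]

-- ===== VERDICT (by name: the statement is the Claim_ definition above) =====
theorem codMan_spec : Claim_equal_codMan := by
  intro input _ _
  unfold Spec_codMan codMan codMan_alt
  cases hx : hexToBin input with
  | none => rfl
  | some binInput =>
    simp only
    rw [PySem.List.foldl_pyRange_zero_pyGetD binInput.toList ' ' codManStepA ("-", "", "")]
    have hA := codMan_loop binInput.toList "-" "" "" false (Or.inl ⟨rfl, rfl⟩)
    have hB := encB_spec binInput.toList
    rw [hB]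
    rw [String.ext_iff, String.toList_ofList]
    simpa using hA
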